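-- pv_equiv track=rewrite | github.com/AlexanderLill/PP-Crypto-Parser | src/ledger_processor.py | _get_ids_summary
-- ===== SOURCE A (Python) =====
-- def _get_ids_summary(transactions):
--     ids = {}
--     for idt in ["refid", "txid"]:
--         ids[idt] = []
--         for t in transactions:
--             if idt in t and len(t[idt]) > 0:
--                 ids[idt].append(t[idt])
--         ids[idt] = list(set(ids[idt]))
--
--     result = ",".join(sorted(ids["refid"]))
--     if len(ids["txid"]) > 0:
--         result += "," + ",".join(sorted(ids["txid"]))
--     return result
-- ===== SOURCE B (Python) =====
-- def _get_ids_summary(transactions):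
--     def joined(key):
--         # sort all (possibly duplicated) values, then emit while skipping
--         # adjacent duplicates -- no set is ever built
--         vals = sorted(t[key] for t in transactions if t.get(key))
--         out = ""
--         prev = None
--         for v in vals:
--             if v != prev:
--                 out = v if prev is None else out + "," + v
--                 prev = v
--         return out
--
--     refid_part = joined("refid")
--     txid_part = joined("txid")
--     if txid_part:
--         return refid_part + "," + txid_part
--     return refid_part
-- ===== Notes on version B (the rewrite author's own statement) =====
-- stated objective: alternative
-- what changed: B builds no set at all: for each id kind it sorts the raw (duplicate-containing) value list and emits the comma-joined string in one scan that skips adjacent duplicates, whereas A dedupes through a set first and then sorts the distinct values before joining.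
import Mathlib
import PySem

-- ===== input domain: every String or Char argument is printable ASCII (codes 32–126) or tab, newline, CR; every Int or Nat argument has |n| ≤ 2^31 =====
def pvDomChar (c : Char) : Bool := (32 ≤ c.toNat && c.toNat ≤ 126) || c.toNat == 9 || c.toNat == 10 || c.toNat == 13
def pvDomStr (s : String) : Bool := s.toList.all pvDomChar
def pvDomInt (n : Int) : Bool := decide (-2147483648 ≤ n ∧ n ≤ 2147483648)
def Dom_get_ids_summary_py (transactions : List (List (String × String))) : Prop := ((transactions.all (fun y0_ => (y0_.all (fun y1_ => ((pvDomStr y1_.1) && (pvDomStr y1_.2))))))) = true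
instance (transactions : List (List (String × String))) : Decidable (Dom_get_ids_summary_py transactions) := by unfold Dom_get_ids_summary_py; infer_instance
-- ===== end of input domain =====

-- B never builds a set: it sorts the raw (duplicated) values and emits the joined
-- string in one scan, skipping adjacent duplicates (objective: alternative).

-- ===== PORT A =====
-- inner loop of A for one id kind idt: collect the non-empty values of t[idt]
def pvACollect (transactions : List (List (String × String))) (idt : String) : List String :=
  transactions.foldl (fun acc t =>
    match (PySem.Dict.ofList t).get? idt with
    | some v => if 0 < PySem.Str.len v then acc ++ [v] else acc
    | none => acc) []

def get_ids_summary_py (transactions : List (List (String × String))) : String :=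
  let refids : PySem.Set String := PySem.Set.ofList (pvACollect transactions "refid")
  let txids : PySem.Set String := PySem.Set.ofList (pvACollect transactions "txid")
  let result := PySem.Str.join "," (PySem.List.sorted refids (fun s => s) false)
  if 0 < PySem.Set.len txids then
    result ++ "," ++ PySem.Str.join "," (PySem.List.sorted txids (fun s => s) false)
  else result

-- ===== PORT B =====
-- B's helper joined(key): sort the raw values, then one scan building the string,
-- emitting a value only when it differs from the previous one
def pvBJoined (transactions : List (List (String × String))) (key : String) : String :=
  let vals := PySem.List.sorted
    (transactions.filterMap (fun t =>
      match (PySem.Dict.ofList t).get? key with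
      | some v => if v ≠ "" then some v else none
      | none => none))
    (fun s => s) false
  (vals.foldl (fun st v =>
      if st.2 = some v then st
      else ((match st.2 with | none => v | some _ => st.1 ++ "," ++ v), some v))
    ("", (none : Option String))).1

def get_ids_summary_py_alt (transactions : List (List (String × String))) : String :=
  let refid_part := pvBJoined transactions "refid"
  let txid_part := pvBJoined transactions "txid"
  if txid_part ≠ "" then refid_part ++ "," ++ txid_part
  else refid_part

-- ===== PRECONDITION & SPEC =====
def Spec_get_ids_summary_py (transactions : List (List (String × String))) (out : String) : Prop := out = get_ids_summary_py_alt transactions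
instance (transactions : List (List (String × String))) (out : String) : Decidable (Spec_get_ids_summary_py transactions out) := by unfold Spec_get_ids_summary_py; infer_instance

-- ===== CLAIM (what is proved, stated in full; the proofs are below) =====
def Claim_equal_get_ids_summary_py : Prop := ∀ (transactions : List (List (String × String))), Dom_get_ids_summary_py transactions → Spec_get_ids_summary_py transactions (get_ids_summary_py transactions)

-- ===== LEMMAS AND PROOFS =====

-- adjacent-duplicate removal, used only to characterise B's scan
def pvDedupAdj : Option String → List String → List String
  | _, [] => []
  | prev, v :: vs => if prev = some v then pvDedupAdj prev vs else v :: pvDedupAdj (some v) vs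

theorem pvJoin_cons_cons (a b : String) (l : List String) :
    PySem.Str.join "," (a :: b :: l) = a ++ "," ++ PySem.Str.join "," (b :: l) := by
  simp only [PySem.Str.join, List.map_cons, PySem.Chars.join_cons_cons]
  rw [List.append_assoc, String.ofList_append, String.ofList_append]
  simp [String.append_assoc]

theorem pvJoin_singleton (v : String) : PySem.Str.join "," [v] = v := by
  simp [PySem.Str.join, PySem.Chars.join_singleton]

theorem pvFoldl_append_pull (l : List String) : ∀ (x y : String),
    List.foldl (fun acc w => acc ++ "," ++ w) (x ++ y) l
      = x ++ List.foldl (fun acc w => acc ++ "," ++ w) y l := by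
  induction l with
  | nil => intro x y; rfl
  | cons w l ih =>
    intro x y
    simp only [List.foldl_cons]
    rw [show x ++ y ++ "," ++ w = x ++ (y ++ "," ++ w) by
      simp [String.append_assoc], ih]

theorem pvJoin_cons_foldl (v : String) (l : List String) :
    PySem.Str.join "," (v :: l) = l.foldl (fun acc w => acc ++ "," ++ w) v := by
  induction l generalizing v with
  | nil => exact pvJoin_singleton v
  | cons w l ih =>
    rw [pvJoin_cons_cons, ih, List.foldl_cons]
    rw [show v ++ "," ++ w = (v ++ ",") ++ w by simp [String.append_assoc]]
    rw [pvFoldl_append_pull]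

-- B's scan computes the foldl over the adjacent-deduped list
theorem pvScan_some (vs : List String) (p : String) (out : String) :
    (vs.foldl (fun st v =>
      if st.2 = some v then st
      else ((match st.2 with | none => v | some _ => st.1 ++ "," ++ v), some v))
      (out, some p)).1
    = (pvDedupAdj (some p) vs).foldl (fun acc w => acc ++ "," ++ w) out := by
  induction vs generalizing p out with
  | nil => rfl
  | cons v vs ih =>
    simp only [List.foldl_cons, pvDedupAdj]
    by_cases h : p = v
    · simp [h, ih]
    · rw [if_neg (show ¬(((out, (some p : Option String))).2 = some v) by simp [h])]
      rw [if_neg (show ¬((some p : Option String) = some v) by simp [h])]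
      rw [List.foldl_cons]
      exact ih v (out ++ "," ++ v)

theorem pvScan_none (vs : List String) :
    (vs.foldl (fun st v =>
      if st.2 = some v then st
      else ((match st.2 with | none => v | some _ => st.1 ++ "," ++ v), some v))
      ("", (none : Option String))).1
    = PySem.Str.join "," (pvDedupAdj none vs) := by
  cases vs with
  | nil => rfl
  | cons v vs =>
    simp only [List.foldl_cons, pvDedupAdj]
    rw [if_neg (show ¬((("", (none : Option String))).2 = some v) by simp)]
    rw [if_neg (show ¬((none : Option String) = some v) by simp)]
    rw [pvJoin_cons_foldl]
    exact pvScan_some vs v v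

theorem pvMem_dedupAdj_of_mem {x : String} : ∀ (vs : List String) (prev : Option String),
    x ∈ pvDedupAdj prev vs → x ∈ vs := by
  intro vs
  induction vs with
  | nil => intro _ h; simp [pvDedupAdj] at h
  | cons v vs ih =>
    intro prev h
    simp only [pvDedupAdj] at h
    split at h
    · exact List.mem_cons_of_mem _ (ih _ h)
    · rcases List.mem_cons.1 h with h | h
      · simp [h]
      · exact List.mem_cons_of_mem _ (ih _ h)

theorem pvMem_dedupAdj {x : String} : ∀ (vs : List String) (prev : Option String),
    x ∈ vs → x ∈ pvDedupAdj prev vs ∨ prev = some x := by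
  intro vs
  induction vs with
  | nil => intro _ h; simp at h
  | cons v vs ih =>
    intro prev h
    simp only [pvDedupAdj]
    by_cases hp : prev = some v
    · rw [if_pos hp]
      rcases List.mem_cons.1 h with h | h
      · right; rw [hp, h]
      · exact ih prev h
    · rw [if_neg hp]
      rcases List.mem_cons.1 h with h | h
      · left; simp [h]
      · rcases ih (some v) h with h' | h'
        · left; exact List.mem_cons_of_mem _ h'
        · left; simp [Option.some.injEq] at h'; simp [h']

theorem pvDedupAdj_pairwise : ∀ (vs : List String), vs.Pairwise (· ≤ ·) →
    ∀ p : String, (∀ x ∈ vs, p ≤ x) →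
    (pvDedupAdj (some p) vs).Pairwise (· < ·) ∧ ∀ x ∈ pvDedupAdj (some p) vs, p < x := by
  intro vs
  induction vs with
  | nil => intro _ p _; simp [pvDedupAdj]
  | cons v vs ih =>
    intro hpw p hle
    have hv : ∀ x ∈ vs, v ≤ x := fun x hx => List.rel_of_pairwise_cons hpw hx
    have hpw' := List.Pairwise.of_cons hpw
    have hpv : p ≤ v := hle v List.mem_cons_self
    simp only [pvDedupAdj]
    by_cases h : p = v
    · rw [if_pos (by rw [h])]
      exact ih hpw' p (fun x hx => h ▸ hv x hx)
    · rw [if_neg (by simp [h])]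
      have hplt : p < v := lt_of_le_of_ne hpv h
      obtain ⟨hpw2, hgt⟩ := ih hpw' v hv
      constructor
      · exact List.Pairwise.cons hgt hpw2
      · intro x hx
        rcases List.mem_cons.1 hx with hx | hx
        · exact hx ▸ hplt
        · exact lt_trans hplt (hgt x hx)

theorem pvDedupAdj_none_pairwise (vs : List String) (h : vs.Pairwise (· ≤ ·)) :
    (pvDedupAdj none vs).Pairwise (· < ·) := by
  cases vs with
  | nil => simp [pvDedupAdj]
  | cons v vs =>
    simp only [pvDedupAdj, reduceCtorEq, if_false]
    obtain ⟨hpw, hgt⟩ := pvDedupAdj_pairwise vs (List.Pairwise.of_cons h) v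
      (fun x hx => List.rel_of_pairwise_cons h hx)
    exact List.Pairwise.cons hgt hpw

theorem pvMem_dedupAdj_none (vs : List String) (x : String) :
    x ∈ pvDedupAdj none vs ↔ x ∈ vs := by
  constructor
  · exact pvMem_dedupAdj_of_mem vs none
  · intro h
    rcases pvMem_dedupAdj vs none h with h' | h'
    · exact h'
    · simp at h'

-- the adjacent dedup of the sorted raw list IS sorted(set(raw))
theorem pvDedupAdj_sorted (l : List String) :
    pvDedupAdj none (PySem.List.sorted l (fun s => s) false)
      = PySem.List.sorted (PySem.Set.ofList l) (fun s => s) false := by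
  have hpw : (pvDedupAdj none (PySem.List.sorted l (fun s => s) false)).Pairwise (· < ·) :=
    pvDedupAdj_none_pairwise _ (PySem.List.sorted_pairwise l (fun s => s))
  refine (PySem.List.sorted_eq_of_perm_of_pairwise_lt _ _ _ ?_ hpw).symm
  rw [List.perm_ext_iff_of_nodup (hpw.imp ne_of_lt) (PySem.Set.nodup_ofList l)]
  intro x
  rw [pvMem_dedupAdj_none, PySem.List.mem_sorted, PySem.Set.mem_ofList]

-- A's collected list is the flatMap of the per-transaction contribution
theorem pvACollect_eq_flatMap (ts : List (List (String × String))) (idt : String) :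
    pvACollect ts idt = ts.flatMap (fun t =>
      match (PySem.Dict.ofList t).get? idt with
      | some v => if 0 < PySem.Str.len v then [v] else []
      | none => []) := by
  unfold pvACollect
  rw [PySem.List.foldl_congr_mem (g := fun acc t => acc ++
        (match (PySem.Dict.ofList t).get? idt with
         | some v => if 0 < PySem.Str.len v then [v] else []
         | none => []))]
  · exact PySem.List.foldl_append_eq_flatMap _ _ _
  · intro acc t _
    cases h : (PySem.Dict.ofList t).get? idt with
    | none => simp
    | some v =>
      dsimp only
      by_cases hl : 0 < PySem.Str.len v
      · rw [if_pos hl, if_pos hl]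
      · rw [if_neg hl, if_neg hl, List.append_nil]

-- B's filterMap collects the same list
theorem pvBCollect_eq_pvACollect (ts : List (List (String × String))) (idt : String) :
    ts.filterMap (fun t =>
      match (PySem.Dict.ofList t).get? idt with
      | some v => if v ≠ "" then some v else none
      | none => none) = pvACollect ts idt := by
  rw [pvACollect_eq_flatMap]
  induction ts with
  | nil => rfl
  | cons t ts ih =>
    rw [List.filterMap_cons, List.flatMap_cons]
    cases h : (PySem.Dict.ofList t).get? idt with
    | none => simpa using ih
    | some v =>
      dsimp only
      by_cases hv : v = ""
      · have hl : ¬ (0 < PySem.Str.len v) := by simp [hv, PySem.Str.len]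
        rw [if_neg (by simp [hv]), if_neg hl]
        simpa using ih
      · have hnil : v.toList ≠ [] := by simpa using hv
        have hl : 0 < PySem.Str.len v := by
          simp only [PySem.Str.len]
          exact_mod_cast List.length_pos_iff.mpr hnil
        rw [if_pos (by simpa using hv), if_pos hl]
        rw [ih]
        rfl

-- elements A collects are non-empty
theorem pvACollect_ne_empty (ts : List (List (String × String))) (idt : String) :
    ∀ v ∈ pvACollect ts idt, v ≠ "" := by
  rw [pvACollect_eq_flatMap]
  intro v hv
  rw [List.mem_flatMap] at hv
  obtain ⟨t, _, hv⟩ := hv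
  revert hv
  cases h : (PySem.Dict.ofList t).get? idt with
  | none => simp
  | some w =>
    dsimp only
    by_cases hl : 0 < PySem.Str.len w
    · rw [if_pos hl]
      intro hv
      rw [List.mem_singleton] at hv
      subst hv
      intro hc
      rw [hc] at hl
      simp [PySem.Str.len] at hl
    · rw [if_neg hl]; simp

-- B's joined = A's join of sorted set
theorem pvBJoined_eq (ts : List (List (String × String))) (idt : String) :
    pvBJoined ts idt
      = PySem.Str.join "," (PySem.List.sorted (PySem.Set.ofList (pvACollect ts idt)) (fun s => s) false) := by
  unfold pvBJoined
  rw [pvBCollect_eq_pvACollect, pvScan_none, pvDedupAdj_sorted]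

-- the joined string is empty iff the set is
theorem pvJoin_ne_empty (l : List String) (h : ∀ v ∈ l, v ≠ "") :
    (PySem.Str.join "," l ≠ "") ↔ l ≠ [] := by
  cases l with
  | nil => simp [PySem.Str.join, PySem.Chars.join_nil]
  | cons v l =>
    simp only [ne_eq, reduceCtorEq, not_false_iff, iff_true]
    have hv : v ≠ "" := h v List.mem_cons_self
    have hnil : v.toList ≠ [] := by simpa using hv
    cases l with
    | nil =>
      rw [pvJoin_singleton]
      exact hv
    | cons w l =>
      rw [pvJoin_cons_cons]
      intro hc
      have := congrArg String.toList hc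
      simp at this

-- ===== VERDICT (by name: the statement is the Claim_ definition above) =====
theorem get_ids_summary_py_spec : Claim_equal_get_ids_summary_py := by
  intro ts _
  unfold Spec_get_ids_summary_py
  simp only [get_ids_summary_py, get_ids_summary_py_alt]
  rw [pvBJoined_eq, pvBJoined_eq]
  have hne : ∀ v ∈ PySem.List.sorted (PySem.Set.ofList (pvACollect ts "txid")) (fun s => s) false, v ≠ "" := by
    intro v hv
    exact pvACollect_ne_empty ts "txid" v
      ((PySem.Set.mem_ofList _ _).1 ((PySem.List.mem_sorted _ _ _ _).1 hv))
  have hiff := pvJoin_ne_empty _ hne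
  by_cases hset : PySem.Set.ofList (pvACollect ts "txid") = []
  · have hs : PySem.List.sorted (PySem.Set.ofList (pvACollect ts "txid")) (fun s => s) false = [] := by
      rw [hset]; rfl
    have hJ : PySem.Str.join "," (PySem.List.sorted (PySem.Set.ofList (pvACollect ts "txid")) (fun s => s) false) = "" := by
      rw [hs]; simp [PySem.Str.join, PySem.Chars.join_nil]
    rw [if_neg (show ¬ (0 < PySem.Set.len (PySem.Set.ofList (pvACollect ts "txid"))) by
          simp [hset, PySem.Set.len])]
    rw [if_neg (show ¬ (PySem.Str.join "," (PySem.List.sorted (PySem.Set.ofList (pvACollect ts "txid")) (fun s => s) false) ≠ "") by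
          simp [hJ])]
  · have hs : PySem.List.sorted (PySem.Set.ofList (pvACollect ts "txid")) (fun s => s) false ≠ [] := by
      intro hcon
      exact hset (by simpa [PySem.List.sorted_eq_nil_iff] using hcon)
    have hJ : PySem.Str.join "," (PySem.List.sorted (PySem.Set.ofList (pvACollect ts "txid")) (fun s => s) false) ≠ "" :=
      hiff.mpr hs
    have hlen : 0 < PySem.Set.len (PySem.Set.ofList (pvACollect ts "txid")) := by
      simp only [PySem.Set.len]
      exact_mod_cast List.length_pos_iff.mpr hset
    rw [if_pos hlen, if_pos hJ]
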